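-- pv_equiv track=rewrite | github.com/abhitrip/scratchpad | LeetCode/pythonSols/LineReflection.py | isReflected
-- ===== SOURCE A (Python) =====
-- def isReflected(points):
--     """
--     :type points: List[List[int]]
--     :rtype: bool
--     """
--     pointSet = set()
--     xMax,xMin = -(1<<31),(1<<31)
--     for point in points:
--         pointSet.add(tuple(point))
--         xMax = max(xMax,point[0])
--         xMin = min(xMin,point[0])
--
--     lineMul2 = (xMax+xMin)
--     for point in points:
--         if (lineMul2-point[0],point[1]) in pointSet:
--             continue
--         else:
--             return False
--
--     return True
-- ===== SOURCE B (Python) =====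
-- def _subset(need, have):
--     """need, have: strictly increasing lists; is every element of need in have?"""
--     i = 0
--     for q in need:
--         while i < len(have) and have[i] < q:
--             i += 1
--         if i == len(have) or have[i] != q:
--             return False
--         i += 1
--     return True
--
--
-- def isReflected(points):
--     lo, hi = (1 << 31), -(1 << 31)
--     for p in points:
--         lo = min(lo, p[0])
--         hi = max(hi, p[0])
--     line = lo + hi
--     have = sorted(set(map(tuple, points)))
--     need = sorted({(line - p[0], p[1]) for p in points})
--     return _subset(need, have)
-- ===== Notes on version B (the rewrite author's own statement) =====
-- stated objective: alternative
-- what changed: B replaces A's hash-set with per-point reflected-membership lookups by a staged sort-and-merge: it sorts the deduplicated point tuples and the deduplicated mirrored pairs and decides the inclusion with one recursive merge scan over the two sorted lists.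
-- outside the precondition, e.g. on isReflected([[1, 1], [5]]): A returns False, B raises IndexError
import Mathlib
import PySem

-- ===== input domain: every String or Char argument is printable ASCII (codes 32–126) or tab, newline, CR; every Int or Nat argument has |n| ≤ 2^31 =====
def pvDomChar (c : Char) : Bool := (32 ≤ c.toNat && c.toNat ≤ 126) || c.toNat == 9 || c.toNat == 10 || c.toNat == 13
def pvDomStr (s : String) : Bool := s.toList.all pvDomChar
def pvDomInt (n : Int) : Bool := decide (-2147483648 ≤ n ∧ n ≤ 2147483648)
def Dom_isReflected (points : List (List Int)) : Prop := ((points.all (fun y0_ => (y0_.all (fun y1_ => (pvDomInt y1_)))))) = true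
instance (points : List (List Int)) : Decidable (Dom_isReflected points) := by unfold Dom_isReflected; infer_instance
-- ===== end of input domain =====

-- B replaces A's hash-set with sorting: it sorts the deduplicated point tuples and the deduplicated
-- mirrored pairs and decides the inclusion by one recursive merge scan; alternative algorithm.


-- ===== PORT A =====
-- tuple(point) is modelled as the List Int itself; pointSet : PySem.Set (List Int).
-- point[0]/point[1] are pyGetD (total form): Pre_ guarantees the indices are in range.
def isReflected (points : List (List Int)) : Bool :=
  let st := points.foldl
    (fun (acc : PySem.Set (List Int) × Int × Int) point =>
      (PySem.Set.add acc.1 point,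
       max acc.2.1 (PySem.List.pyGetD point 0 0),
       min acc.2.2 (PySem.List.pyGetD point 0 0)))
    (PySem.Set.empty, -2147483648, 2147483648)
  let lineMul2 := st.2.1 + st.2.2
  -- second loop: 'continue' on a hit, 'return False' on a miss, 'return True' at the end = List.all
  points.all (fun point =>
    PySem.Set.contains st.1
      [lineMul2 - PySem.List.pyGetD point 0 0, PySem.List.pyGetD point 1 0])

-- ===== PORT B =====
-- _subset(need, have): index-threaded merge scan; the inner while loop is pvAdvance,
-- the outer for loop with its early 'return False' is a fold over an Option Nat state.
-- Python's tuple comparison on int tuples is Lean's lexicographic '<' on List Int.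
def pvAdvance (hv : List (List Int)) (i : Nat) (q : List Int) : Nat :=
  if h : i < hv.length then
    if hv[i] < q then pvAdvance hv (i + 1) q else i
  else i
termination_by hv.length - i

-- one iteration of the outer for loop (early 'return False' = the none state)
def pvStep (hv : List (List Int)) (st : Option Nat) (q : List Int) : Option Nat :=
  match st with
  | none => none
  | some i =>
    let j := pvAdvance hv i q
    if _ : j < hv.length then
      if hv[j] = q then some (j + 1) else none
    else none

def pvSubset (need hv : List (List Int)) : Bool :=
  (need.foldl (pvStep hv) (some 0)).isSome

-- tuple(p) is the List Int itself; the mirrored pair (line-p[0], p[1]) is a 2-element list;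
-- sorted(set(..)) = PySem.List.sorted over PySem.Set.ofList (no key: order-insensitive on the set).
def isReflected_alt (points : List (List Int)) : Bool :=
  let st := points.foldl
    (fun (acc : Int × Int) p =>
      (min acc.1 (PySem.List.pyGetD p 0 0), max acc.2 (PySem.List.pyGetD p 0 0)))
    (2147483648, -2147483648)
  let line := st.1 + st.2
  let hv := PySem.List.sorted (PySem.Set.ofList points) (fun v => v) false
  let need := PySem.List.sorted
    (PySem.Set.ofList (points.map (fun p =>
      [line - PySem.List.pyGetD p 0 0, PySem.List.pyGetD p 1 0]))) (fun v => v) false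
  pvSubset need hv

-- ===== PRECONDITION & SPEC =====
-- Pre_ excludes inputs with an inner list of length < 2: there B raises IndexError reading p[1]
-- (and A raises too unless an earlier point already failed its lookup and returned False first).
def Pre_isReflected (points : List (List Int)) : Prop :=
  ∀ p ∈ points, 2 ≤ p.length
instance (points : List (List Int)) : Decidable (Pre_isReflected points) := by
  unfold Pre_isReflected; infer_instance
def pvWitness_isReflected : List (List Int) := [[1, 1], [-1, 1], [0, 0]]
def Spec_isReflected (points : List (List Int)) (out : Bool) : Prop := out = isReflected_alt points
instance (points : List (List Int)) (out : Bool) : Decidable (Spec_isReflected points out) := by unfold Spec_isReflected; infer_instance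

-- ===== CLAIM (what is proved, stated in full; the proofs are below) =====
def Claim_equal_isReflected : Prop := ∀ (points : List (List Int)), Dom_isReflected points → Pre_isReflected points → Spec_isReflected points (isReflected points)

-- ===== LEMMAS AND PROOFS =====

-- A's single loop over three pieces of state, split into three independent folds.
theorem foldl_tripleA (points : List (List Int)) (s : PySem.Set (List Int)) (m n : Int) :
    points.foldl
      (fun (acc : PySem.Set (List Int) × Int × Int) point =>
        (PySem.Set.add acc.1 point,
         max acc.2.1 (PySem.List.pyGetD point 0 0),
         min acc.2.2 (PySem.List.pyGetD point 0 0)))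
      (s, m, n)
    = (points.foldl PySem.Set.add s,
       points.foldl (fun a p => max a (PySem.List.pyGetD p 0 0)) m,
       points.foldl (fun a p => min a (PySem.List.pyGetD p 0 0)) n) := by
  induction points generalizing s m n with
  | nil => rfl
  | cons p t ih =>
    simp only [List.foldl_cons]
    exact ih _ _ _

-- the Decidable instance packaged by List.instLinearOrder is the one the port's '<' uses
theorem sorted_castInst (l : List (List Int)) :
    PySem.List.sorted l (fun v : List Int => v) false
      = @PySem.List.sorted (List Int) (List Int) List.instLinearOrder.toLT
          LinearOrder.toDecidableLT l (fun v => v) false := by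
  congr 1

-- sorting a deduplicated set gives a strictly increasing list
theorem pairwise_lt_sorted_ofList (l : List (List Int)) :
    List.Pairwise (· < ·) (PySem.List.sorted (PySem.Set.ofList l) (fun v => v) false) := by
  have hnd : (PySem.List.sorted (PySem.Set.ofList l) (fun v => v) false).Nodup :=
    (PySem.List.sorted_perm _ _ _).nodup_iff.mpr (PySem.Set.nodup_ofList l)
  have hle : List.Pairwise (fun a b : List Int => a ≤ b)
      (PySem.List.sorted (PySem.Set.ofList l) (fun v => v) false) := by
    rw [sorted_castInst]
    exact PySem.List.sorted_pairwise _ _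
  exact (hle.and hnd).imp (fun h => lt_of_le_of_ne h.1 h.2)

-- the inner while loop stops at the first index not below q, skipping only smaller entries
theorem pvAdvance_fuel (hv : List (List Int)) (q : List Int) :
    ∀ (fuel i : Nat), hv.length - i ≤ fuel → i ≤ hv.length →
      i ≤ pvAdvance hv i q ∧ pvAdvance hv i q ≤ hv.length ∧
      (∀ k, (hk : k < hv.length) → i ≤ k → k < pvAdvance hv i q → hv[k] < q) ∧
      (∀ (h : pvAdvance hv i q < hv.length), ¬ hv[pvAdvance hv i q] < q) := by
  intro fuel
  induction fuel with
  | zero =>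
    intro i hf hi
    rw [pvAdvance, dif_neg (by omega)]
    exact ⟨le_refl _, hi, fun k hk h1 h2 => absurd h2 (by omega),
      fun h => absurd h (by omega)⟩
  | succ n ih =>
    intro i hf hi
    by_cases h : i < hv.length
    · by_cases hlt : hv[i] < q
      · rw [pvAdvance, dif_pos h, if_pos hlt]
        obtain ⟨h1, h2, h3, h4⟩ := ih (i + 1) (by omega) (by omega)
        refine ⟨by omega, h2, ?_, h4⟩
        intro k hk hik hkj
        by_cases hki : k = i
        · subst hki; exact hlt
        · exact h3 k hk (by omega) hkj
      · rw [pvAdvance, dif_pos h, if_neg hlt]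
        exact ⟨le_refl _, by omega, fun k hk h1 h2 => absurd h2 (by omega),
          fun _ => hlt⟩
    · rw [pvAdvance, dif_neg h]
      exact ⟨le_refl _, by omega, fun k hk h1 h2 => absurd h2 (by omega),
        fun hj => absurd hj h⟩

theorem pvAdvance_props (hv : List (List Int)) (q : List Int) (i : Nat) (hi : i ≤ hv.length) :
    i ≤ pvAdvance hv i q ∧ pvAdvance hv i q ≤ hv.length ∧
    (∀ k, (hk : k < hv.length) → i ≤ k → k < pvAdvance hv i q → hv[k] < q) ∧
    (∀ (h : pvAdvance hv i q < hv.length), ¬ hv[pvAdvance hv i q] < q) :=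
  pvAdvance_fuel hv q hv.length i (by omega) hi

-- once the state is none ('return False' has fired) the fold stays none
theorem foldl_step_none (hv : List (List Int)) (l : List (List Int)) :
    l.foldl (pvStep hv) none = none := by
  induction l with
  | nil => rfl
  | cons x t ih => exact ih

-- the scan from index i decides inclusion, provided everything before i is below all of need
theorem scan_iff (hv : List (List Int)) (hh : List.Pairwise (· < ·) hv) :
    ∀ (need : List (List Int)), List.Pairwise (· < ·) need →
    ∀ (i : Nat), i ≤ hv.length →
    (∀ k, (hk : k < hv.length) → k < i → ∀ x ∈ need, hv[k] < x) →
    ((need.foldl (pvStep hv) (some i)).isSome = true ↔ ∀ x ∈ need, x ∈ hv) := by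
  intro need
  induction need with
  | nil => intro _ i _ _; simp
  | cons q nt ih =>
    intro hn i hi hskip
    rw [List.pairwise_cons] at hn
    rw [List.foldl_cons]
    obtain ⟨ha1, ha2, ha3, ha4⟩ := pvAdvance_props hv q i hi
    have hskipq : ∀ k, (hk : k < hv.length) → k < pvAdvance hv i q → hv[k] < q := by
      intro k hk hkj
      by_cases hki : k < i
      · exact hskip k hk hki q (by simp)
      · exact ha3 k hk (by omega) hkj
    by_cases hjl : pvAdvance hv i q < hv.length
    · by_cases heq : hv[pvAdvance hv i q] = q
      · rw [show pvStep hv (some i) q = some (pvAdvance hv i q + 1) from by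
          simp [pvStep, hjl, heq]]
        have hmemq : q ∈ hv := List.mem_iff_getElem.mpr ⟨pvAdvance hv i q, hjl, heq⟩
        rw [ih hn.2 (pvAdvance hv i q + 1) (by omega) ?_]
        · rw [List.forall_mem_cons]
          exact ⟨fun h => ⟨hmemq, h⟩, fun h => h.2⟩
        · intro k hk hki x hx
          have hqx : q < x := hn.1 x hx
          by_cases hkj : k < pvAdvance hv i q
          · exact lt_trans (hskipq k hk hkj) hqx
          · have hkeq : k = pvAdvance hv i q := by omega
            subst hkeq
            exact lt_of_eq_of_lt heq hqx
      · rw [show pvStep hv (some i) q = none from by simp [pvStep, hjl, heq],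
          foldl_step_none]
        simp only [Option.isSome_none, Bool.false_eq_true, false_iff]
        intro hall
        obtain ⟨k, hk, hkq⟩ := List.mem_iff_getElem.mp (hall q List.mem_cons_self)
        rcases lt_trichotomy k (pvAdvance hv i q) with hkj | hkj | hkj
        · exact absurd (hkq ▸ hskipq k hk hkj) (lt_irrefl q)
        · subst hkj
          exact heq hkq
        · have := (List.pairwise_iff_getElem.mp hh) (pvAdvance hv i q) k hjl hk hkj
          rw [hkq] at this
          exact ha4 hjl this
    · rw [show pvStep hv (some i) q = none from by simp [pvStep, hjl],
          foldl_step_none]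
      simp only [Option.isSome_none, Bool.false_eq_true, false_iff]
      intro hall
      obtain ⟨k, hk, hkq⟩ := List.mem_iff_getElem.mp (hall q List.mem_cons_self)
      have hkj : k < pvAdvance hv i q := by omega
      exact absurd (hkq ▸ hskipq k hk hkj) (lt_irrefl q)

-- the merge scan on strictly increasing lists decides membership-inclusion
theorem pvSubset_iff (hv need : List (List Int))
    (hn : List.Pairwise (· < ·) need) (hh : List.Pairwise (· < ·) hv) :
    (pvSubset need hv = true ↔ ∀ x ∈ need, x ∈ hv) := by
  unfold pvSubset
  exact scan_iff hv hh need hn 0 (Nat.zero_le _) (fun k hk h => absurd h (by omega))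

theorem isReflected_eq (points : List (List Int)) :
    isReflected points = isReflected_alt points := by
  simp only [isReflected, isReflected_alt, foldl_tripleA]
  rw [PySem.List.foldl_prod_mk
    (f := fun a p => min a (PySem.List.pyGetD p 0 0))
    (g := fun a p => max a (PySem.List.pyGetD p 0 0))]
  set mn := points.foldl (fun a p => min a (PySem.List.pyGetD p 0 0)) 2147483648 with hmn
  set mx := points.foldl (fun a p => max a (PySem.List.pyGetD p 0 0)) (-2147483648) with hmx
  rw [add_comm mn mx]
  set L := mx + mn with hL
  have hset : points.foldl PySem.Set.add PySem.Set.empty = PySem.Set.ofList points :=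
    (PySem.Set.ofList_eq_foldl _).symm
  rw [hset, Bool.eq_iff_iff]
  set need := PySem.List.sorted
    (PySem.Set.ofList (points.map (fun p =>
      [L - PySem.List.pyGetD p 0 0, PySem.List.pyGetD p 1 0]))) (fun v => v) false with hneed
  set hv := PySem.List.sorted (PySem.Set.ofList points) (fun v => v) false with hhv
  rw [pvSubset_iff hv need (pairwise_lt_sorted_ofList _) (pairwise_lt_sorted_ofList _)]
  have hmemhv : ∀ x, x ∈ hv ↔ x ∈ points := fun x =>
    ((PySem.List.sorted_perm _ _ _).mem_iff).trans (PySem.Set.mem_ofList _ _)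
  have hmemneed : ∀ x, x ∈ need ↔
      ∃ p ∈ points, [L - PySem.List.pyGetD p 0 0, PySem.List.pyGetD p 1 0] = x := fun x =>
    ((PySem.List.sorted_perm _ _ _).mem_iff).trans
      ((PySem.Set.mem_ofList _ _).trans List.mem_map)
  simp only [List.all_eq_true, PySem.Set.contains_iff, PySem.Set.mem_ofList]
  constructor
  · intro hA x hx
    obtain ⟨p, hp, rfl⟩ := (hmemneed x).mp hx
    exact (hmemhv _).mpr (hA p hp)
  · intro hB p hp
    exact (hmemhv _).mp (hB _ ((hmemneed _).mpr ⟨p, hp, rfl⟩))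

-- ===== VERDICT (by name: the statement is the Claim_ definition above) =====
theorem isReflected_spec : Claim_equal_isReflected := by
  intro points _ _
  unfold Spec_isReflected
  exact isReflected_eq points
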